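-- pv_equiv track=rewrite | github.com/pyember/ember | src/ember/non/compact.py | _expand_spec_sequence
-- ===== SOURCE A (Python) =====
-- from typing import Dict, Iterable, List, Mapping, Optional, Sequence, Set, Tuple, TypeAlias
--
-- def _expand_spec_sequence(
--     spec: Sequence[str],
--     components: Mapping[str, Sequence[str]],
--     _stack: Optional[List[str]] = None,
-- ) -> List[str]:
--     stack = list(_stack or [])
--     expanded: List[str] = []
--     for item in spec:
--         if item.startswith("$"):
--             name = item[1:]
--             if name in stack:
--                 cycle_path = " -> ".join(stack + [name])
--                 raise ValueError(f"Cyclic component reference detected: {cycle_path}")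
--             if name not in components:
--                 raise KeyError(f"Unknown component reference '${name}'")
--             expanded.extend(_expand_spec_sequence(components[name], components, stack + [name]))
--         else:
--             expanded.append(item)
--     return expanded
-- ===== SOURCE B (Python) =====
-- def _expand_spec_sequence(spec, components, _stack=None):
--     # Iterative breadth-wise rewriting: repeatedly substitute every "$name"
--     # reference by its component sequence (one level per round).  A reference
--     # chain can be at most len(components) deep when acyclic, so after
--     # len(components) + 2 rounds only literals can remain; running out of
--     # rounds means there is a reachable cycle.
--     forbidden = list(_stack or [])
--     cur = list(spec)
--     for _ in range(len(components) + 2):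
--         if not any(item.startswith("$") for item in cur):
--             return cur
--         nxt = []
--         for item in cur:
--             if not item.startswith("$"):
--                 nxt.append(item)
--                 continue
--             name = item[1:]
--             if name in forbidden:
--                 raise ValueError(
--                     "Cyclic component reference detected: "
--                     + " -> ".join(forbidden + [name])
--                 )
--             if name not in components:
--                 raise KeyError(f"Unknown component reference '${name}'")
--             nxt.extend(components[name])
--         cur = nxt
--     raise ValueError("Cyclic component reference detected")
-- ===== Notes on version B (the rewrite author's own statement) =====
-- stated objective: alternative
-- what changed: Replaces A's depth-first recursion (with an explicit cycle-path stack) by an iterative level-wise rewriting loop that substitutes all references one nesting level per round, bounded by len(components)+2 rounds since an acyclic reference chain is at most len(components) deep.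
import Mathlib
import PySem

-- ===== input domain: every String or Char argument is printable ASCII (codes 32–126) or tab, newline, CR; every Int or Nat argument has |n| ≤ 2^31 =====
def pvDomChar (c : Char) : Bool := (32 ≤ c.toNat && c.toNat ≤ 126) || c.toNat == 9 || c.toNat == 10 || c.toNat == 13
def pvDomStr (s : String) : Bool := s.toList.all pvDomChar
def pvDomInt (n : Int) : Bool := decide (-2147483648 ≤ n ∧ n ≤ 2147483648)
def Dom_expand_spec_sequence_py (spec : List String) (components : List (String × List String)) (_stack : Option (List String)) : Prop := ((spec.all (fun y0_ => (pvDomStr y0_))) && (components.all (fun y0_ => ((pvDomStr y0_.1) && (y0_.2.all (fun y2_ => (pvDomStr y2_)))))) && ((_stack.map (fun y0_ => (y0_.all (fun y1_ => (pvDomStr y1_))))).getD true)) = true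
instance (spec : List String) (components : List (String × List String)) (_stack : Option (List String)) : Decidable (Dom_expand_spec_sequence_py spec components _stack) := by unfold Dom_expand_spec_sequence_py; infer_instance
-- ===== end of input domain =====

-- B replaces A's depth-first recursion by a bounded level-wise substitution loop (a different
-- decomposition of the same task, not claimed faster); equal outputs proved on Pre_ (A returns).


-- ===== PORT A =====
-- `list(_stack or [])` (an empty or missing _stack both give [])
def pvBase (_stack : Option (List String)) : List String :=
  match _stack with
  | none => []
  | some s => s

-- termination measure for A's DFS: number of (distinct) component keys not yet on the stack
def pvMu (components : List (String × List String)) (stack : List String) : Nat :=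
  (((components.map Prod.fst).dedup).filter (fun k => !(stack.contains k))).length

lemma pvGet?_mem_keys (l : List (String × List String)) (n : String) (v : List String)
    (h : PySem.Dict.get? (PySem.Dict.mk l) n = some v) : n ∈ l.map Prod.fst := by
  induction l with
  | nil => simp [PySem.Dict.get?] at h
  | cons kv rest ih =>
    rw [show PySem.Dict.mk (kv :: rest) = PySem.Dict.mk ((kv.1, kv.2) :: rest) by simp] at h
    rw [PySem.Dict.get?_mk_cons] at h
    by_cases hk : kv.1 == n
    · exact List.mem_map.mpr ⟨kv, List.mem_cons_self, eq_of_beq hk⟩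
    · simp only [hk, Bool.false_eq_true, if_false] at h
      exact List.mem_cons_of_mem _ (ih h)

lemma pvMu_lt (components : List (String × List String)) (stack : List String) (n : String)
    (v : List String) (hget : PySem.Dict.get? (PySem.Dict.mk components) n = some v)
    (hc : stack.contains n = false) :
    pvMu components (stack ++ [n]) < pvMu components stack := by
  have hmem : n ∈ (components.map Prod.fst).dedup := by
    rw [List.mem_dedup]; exact pvGet?_mem_keys components n v hget
  have hsub : (((components.map Prod.fst).dedup).filter (fun k => !((stack ++ [n]).contains k))).Sublist
      (((components.map Prod.fst).dedup).filter (fun k => !(stack.contains k))) := by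
    apply List.monotone_filter_right
    intro a ha
    simp only [List.contains_append, Bool.not_eq_eq_eq_not, Bool.not_true, Bool.or_eq_false_iff] at ha ⊢
    exact ha.1
  have hin : n ∈ ((components.map Prod.fst).dedup).filter (fun k => !(stack.contains k)) := by
    rw [List.mem_filter]; exact ⟨hmem, by simpa using hc⟩
  have hout : n ∉ ((components.map Prod.fst).dedup).filter (fun k => !((stack ++ [n]).contains k)) := by
    rw [List.mem_filter]; intro ⟨_, h2⟩; simp at h2
  rcases Nat.lt_or_ge (pvMu components (stack ++ [n])) (pvMu components stack) with h | h
  · exact h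
  · exfalso
    have hl := hsub.length_le
    have : pvMu components (stack ++ [n]) = pvMu components stack := le_antisymm hl h
    exact hout ((hsub.eq_of_length this) ▸ hin)

-- the recursive body of A: for item in spec, with the path `stack`
def expandDfs (components : List (String × List String)) : List String → List String → List String
  | [], _ => []
  | item :: rest, stack =>
    if hs : PySem.Str.startswith item "$" = true then
      -- name = item[1:]
      let name := PySem.Str.slice item (some 1) none
      if hc : stack.contains name = true then
        []  -- raise ValueError (cyclic reference): excluded by Pre_
      else
        match hget : PySem.Dict.get? (PySem.Dict.mk components) name with
        | none => []  -- raise KeyError (unknown reference): excluded by Pre_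
        | some sub =>
          expandDfs components sub (stack ++ [name]) ++ expandDfs components rest stack
    else
      item :: expandDfs components rest stack
termination_by l stack => (pvMu components stack, l.length)
decreasing_by
  · exact Prod.Lex.left _ _ (pvMu_lt components stack _ sub hget (Bool.not_eq_true _ ▸ hc))
  · apply Prod.Lex.right; simp
  · apply Prod.Lex.right; simp

def expand_spec_sequence_py (spec : List String) (components : List (String × List String)) (_stack : Option (List String)) : List String :=
  expandDfs components spec (pvBase _stack)

-- ===== PORT B =====
-- one round: substitute every "$name" reference by its component sequence, one level
-- (`none` = the round raises ValueError/KeyError)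
def substOnce (components : List (String × List String)) (forbidden : List String) : List String → Option (List String)
  | [] => some []
  | item :: rest =>
    if PySem.Str.startswith item "$" = true then
      let name := PySem.Str.slice item (some 1) none
      if forbidden.contains name = true then
        none  -- raise ValueError
      else
        match PySem.Dict.get? (PySem.Dict.mk components) name with
        | none => none  -- raise KeyError
        | some v => (substOnce components forbidden rest).map (fun t => v ++ t)
    else
      (substOnce components forbidden rest).map (fun t => item :: t)

-- the bounded rewriting loop: `for _ in range(len(components) + 2)` (fuel 0 = loop exhausted, raise)
def substLoop (components : List (String × List String)) (forbidden : List String) : Nat → List String → List String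
  | 0, _ => []  -- fell off the loop: raise ValueError (cycle); excluded by Pre_
  | k + 1, cur =>
    if cur.any (fun item => PySem.Str.startswith item "$") then
      match substOnce components forbidden cur with
      | none => []  -- the round raised; excluded by Pre_
      | some nxt => substLoop components forbidden k nxt
    else
      cur

def expand_spec_sequence_py_alt (spec : List String) (components : List (String × List String)) (_stack : Option (List String)) : List String :=
  substLoop components (pvBase _stack) (components.length + 2) spec

-- ===== PRECONDITION & SPEC =====
-- reference made by one item: "$name" ↦ name
def pvRefOf (s : String) : Option String :=
  if PySem.Str.startswith s "$" = true then some (PySem.Str.slice s (some 1) none) else none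

def pvRefs (l : List String) : List String := l.filterMap pvRefOf

-- names referenced by the component bound to n (none if n is unknown)
def pvSuccs (components : List (String × List String)) (n : String) : List String :=
  pvRefs ((PySem.Dict.get? (PySem.Dict.mk components) n).getD [])

-- level j of the reference graph: names reachable from S in exactly j reference steps
def pvLev (components : List (String × List String)) (S : List String) : Nat → List String
  | 0 => S
  | j + 1 => (pvLev components S j).flatMap (pvSuccs components)

-- Pre_: exactly the inputs on which A returns (raises nothing): every component name reachable
-- from spec (at any expansion depth) is a known key and not on the initial _stack, and the
-- reachability levels die out (no reachable cycle).
def Pre_expand_spec_sequence_py (spec : List String) (components : List (String × List String)) (_stack : Option (List String)) : Prop :=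
  (∀ j ∈ List.range (components.length + 1), ∀ n ∈ pvLev components (pvRefs spec) j,
      (PySem.Dict.get? (PySem.Dict.mk components) n).isSome = true ∧ (pvBase _stack).contains n = false)
  ∧ pvLev components (pvRefs spec) (components.length + 1) = []

instance (spec : List String) (components : List (String × List String)) (_stack : Option (List String)) : Decidable (Pre_expand_spec_sequence_py spec components _stack) := by
  unfold Pre_expand_spec_sequence_py; infer_instance

def pvWitness_expand_spec_sequence_py : List String × (List (String × List String)) × Option (List String) :=
  (["$a", "x"], [("a", ["y", "$b"]), ("b", ["z"])], none)

def Spec_expand_spec_sequence_py (spec : List String) (components : List (String × List String)) (_stack : Option (List String)) (out : List String) : Prop := out = expand_spec_sequence_py_alt spec components _stack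
instance (spec : List String) (components : List (String × List String)) (_stack : Option (List String)) (out : List String) : Decidable (Spec_expand_spec_sequence_py spec components _stack out) := by unfold Spec_expand_spec_sequence_py; infer_instance

-- ===== CLAIM (what is proved, stated in full; the proofs are below) =====
def Claim_equal_expand_spec_sequence_py : Prop := ∀ (spec : List String) (components : List (String × List String)) (_stack : Option (List String)), Dom_expand_spec_sequence_py spec components _stack → Pre_expand_spec_sequence_py spec components _stack → Spec_expand_spec_sequence_py spec components _stack (expand_spec_sequence_py spec components _stack)

-- ===== LEMMAS AND PROOFS =====

-- unfolding equations of A's DFS in its three live shapes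
lemma expandDfs_cons_ref (C : List (String × List String)) (item : String) (rest stack : List String)
    (hs : PySem.Str.startswith item "$" = true)
    (hc : stack.contains (PySem.Str.slice item (some 1) none) = false) (sub : List String)
    (hget : PySem.Dict.get? (PySem.Dict.mk C) (PySem.Str.slice item (some 1) none) = some sub) :
    expandDfs C (item :: rest) stack =
      expandDfs C sub (stack ++ [PySem.Str.slice item (some 1) none]) ++ expandDfs C rest stack := by
  simp only [expandDfs, hs, dite_true, hc, Bool.false_eq_true, dite_false]
  split
  · next heq => rw [hget] at heq; cases heq
  · next sub2 heq =>
    rw [hget] at heq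
    cases heq
    rfl

lemma expandDfs_cons_lit (C : List (String × List String)) (item : String) (rest stack : List String)
    (hs : PySem.Str.startswith item "$" = false) :
    expandDfs C (item :: rest) stack = item :: expandDfs C rest stack := by
  simp only [expandDfs, hs, Bool.false_eq_true, dite_false]

lemma expandDfs_nil (C : List (String × List String)) (stack : List String) :
    expandDfs C [] stack = [] := by
  simp [expandDfs]

-- the two consequences of Pre_ the proofs use, closed under all levels
def pvHglob (C : List (String × List String)) (S B0 : List String) : Prop :=
  ∀ j n, n ∈ pvLev C S j →
    (PySem.Dict.get? (PySem.Dict.mk C) n).isSome = true ∧ B0.contains n = false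

def pvHdead (C : List (String × List String)) (S : List String) : Prop :=
  ∀ j, C.length + 1 ≤ j → pvLev C S j = []

lemma pvLev_nil_succ (C : List (String × List String)) (S : List String) (j : Nat)
    (h : pvLev C S j = []) : pvLev C S (j + 1) = [] := by
  simp [pvLev, h]

lemma pre_imp (spec : List String) (C : List (String × List String)) (_stack : Option (List String))
    (h : Pre_expand_spec_sequence_py spec C _stack) :
    pvHglob C (pvRefs spec) (pvBase _stack) ∧ pvHdead C (pvRefs spec) := by
  obtain ⟨h1, h2⟩ := h
  have hdead : pvHdead C (pvRefs spec) := by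
    intro j hj
    induction j with
    | zero => omega
    | succ k ih =>
      rcases Nat.lt_or_ge k (C.length + 1) with hk | hk
      · have : k + 1 = C.length + 1 := by omega
        rw [this]; exact h2
      · exact pvLev_nil_succ C _ k (ih hk)
  refine ⟨?_, hdead⟩
  intro j n hn
  rcases Nat.lt_or_ge j (C.length + 1) with hj | hj
  · exact h1 j (List.mem_range.mpr hj) n hn
  · rw [hdead j hj] at hn; exact absurd hn (List.not_mem_nil)

lemma pvLev_step (C : List (String × List String)) (S : List String) (a : Nat) (n m : String)
    (hn : n ∈ pvLev C S a) (hm : m ∈ pvSuccs C n) : m ∈ pvLev C S (a + 1) := by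
  simp only [pvLev, List.mem_flatMap]
  exact ⟨n, hn, hm⟩

lemma pvRefs_cons_of_mem (item : String) (rest : List String) (m : String)
    (h : m ∈ pvRefs rest) : m ∈ pvRefs (item :: rest) := by
  simp only [pvRefs, List.filterMap_cons] at h ⊢
  cases pvRefOf item
  · exact h
  · exact List.mem_cons_of_mem _ h

lemma pvRefOf_not_startswith (item : String) (hs : ¬ PySem.Str.startswith item "$" = true) :
    pvRefOf item = none := by
  unfold pvRefOf
  rw [if_neg hs]

lemma pvRefOf_startswith (item : String) (hs : PySem.Str.startswith item "$" = true) :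
    pvRefOf item = some (PySem.Str.slice item (some 1) none) := by
  unfold pvRefOf
  rw [if_pos hs]

lemma pvRefs_head_mem (item : String) (rest : List String)
    (hs : PySem.Str.startswith item "$" = true) :
    PySem.Str.slice item (some 1) none ∈ pvRefs (item :: rest) := by
  simp only [pvRefs, List.filterMap_cons, pvRefOf_startswith item hs]
  exact List.mem_cons_self

-- `p` is a DFS path: element i sits in level a+i and consecutive elements are reference steps
def pvLinked (C : List (String × List String)) (S : List String) : Nat → List String → Prop
  | _, [] => True
  | a, n :: t => n ∈ pvLev C S a ∧ pvLinked C S (a + 1) t ∧ (∀ m, t.head? = some m → m ∈ pvSuccs C n)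

-- every reference of `l` continues the path `p` (or starts at level a when p = [])
def pvNextOk (C : List (String × List String)) (S : List String) (a : Nat) (p l : List String) : Prop :=
  ∀ m ∈ pvRefs l,
    match p.getLast? with
    | none => m ∈ pvLev C S a
    | some x => m ∈ pvSuccs C x

lemma pvLinked_relevel (C : List (String × List String)) (S : List String) :
    ∀ (t : List String) (n : String) (a c : Nat), pvLinked C S a (n :: t) → n ∈ pvLev C S c →
      pvLinked C S c (n :: t) := by
  intro t
  induction t with
  | nil => intro n a c _ hc; exact ⟨hc, trivial, fun m hm => by simp at hm⟩
  | cons m t' ih =>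
    intro n a c h hc
    obtain ⟨hn, hlink, hhead⟩ := h
    have hm : m ∈ pvSuccs C n := hhead m rfl
    exact ⟨hc, ih m (a + 1) (c + 1) hlink (pvLev_step C S c n m hc hm), hhead⟩

lemma pvLinked_last (C : List (String × List String)) (S : List String) :
    ∀ (t : List String) (n : String) (a : Nat), pvLinked C S a (n :: t) →
      (n :: t).getLast (by simp) ∈ pvLev C S (a + t.length) := by
  intro t
  induction t with
  | nil => intro n a h; simpa using h.1
  | cons m t' ih =>
    intro n a h
    have := ih m (a + 1) h.2.1
    rw [List.getLast_cons (by simp)]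
    have harith : a + 1 + t'.length = a + (m :: t').length := by simp; omega
    rw [← harith]
    exact this

lemma pvLinked_append_right (C : List (String × List String)) (S : List String) :
    ∀ (u w : List String) (a : Nat), pvLinked C S a (u ++ w) → pvLinked C S (a + u.length) w := by
  intro u
  induction u with
  | nil => intro w a h; simpa using h
  | cons x u' ih =>
    intro w a h
    have h' : pvLinked C S (a + 1) (u' ++ w) := h.2.1
    have := ih w (a + 1) h'
    have harith : a + 1 + u'.length = a + (x :: u').length := by simp; omega
    rw [← harith]
    exact this

lemma pvLinked_snoc (C : List (String × List String)) (S : List String) :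
    ∀ (p l : List String) (a : Nat) (n : String), pvLinked C S a p → pvNextOk C S a p l →
      n ∈ pvRefs l → pvLinked C S a (p ++ [n]) := by
  intro p
  induction p with
  | nil =>
    intro l a n _ hN hn
    have : n ∈ pvLev C S a := by simpa [pvNextOk] using hN n hn
    exact ⟨this, trivial, fun m hm => by simp at hm⟩
  | cons x t ih =>
    intro l a n hL hN hn
    obtain ⟨hx, hL', hhead⟩ := hL
    cases t with
    | nil =>
      have hsx : n ∈ pvSuccs C x := by simpa [pvNextOk] using hN n hn
      refine ⟨hx, ?_, ?_⟩
      · exact ⟨pvLev_step C S a x n hx hsx, trivial, fun m hm => by simp at hm⟩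
      · intro m hm; simp at hm; subst hm; exact hsx
    | cons y t' =>
      have hN' : pvNextOk C S (a + 1) (y :: t') l := by
        intro m hm
        have := hN m hm
        simpa [pvNextOk] using this
      refine ⟨hx, ?_, ?_⟩
      · exact ih l (a + 1) n hL' hN' hn
      · intro m hm; simp at hm; subst hm; exact hhead y rfl

lemma pv_level_of_next (C : List (String × List String)) (S : List String)
    (p l : List String) (a : Nat) (n : String) (hL : pvLinked C S a p) (hN : pvNextOk C S a p l)
    (hn : n ∈ pvRefs l) : ∃ c, n ∈ pvLev C S c := by
  cases p with
  | nil => exact ⟨a, by simpa [pvNextOk] using hN n hn⟩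
  | cons x t =>
    have hlast := pvLinked_last C S t x a hL
    have hsucc : n ∈ pvSuccs C ((x :: t).getLast (by simp)) := by
      have := hN n hn
      rwa [List.getLast?_eq_some_getLast (l := x :: t) (by simp)] at this
    exact ⟨a + t.length + 1, pvLev_step C S (a + t.length) _ n hlast hsucc⟩

lemma pv_no_revisit (C : List (String × List String)) (S : List String)
    (hD : pvHdead C S) (p l : List String) (a : Nat) (n : String)
    (hL : pvLinked C S a p) (hN : pvNextOk C S a p l) (hn : n ∈ pvRefs l) : n ∉ p := by
  intro hmem
  obtain ⟨u, v, rfl⟩ := List.append_of_mem hmem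
  have hL' : pvLinked C S (a + u.length) (n :: v) := pvLinked_append_right C S u (n :: v) a hL
  have hsucc : n ∈ pvSuccs C ((n :: v).getLast (by simp)) := by
    have := hN n hn
    rw [List.getLast?_append, List.getLast?_eq_some_getLast (l := n :: v) (by simp)] at this
    simpa using this
  have cyc : ∀ c, n ∈ pvLev C S c → n ∈ pvLev C S (c + (v.length + 1)) := by
    intro c hc
    have hl2 := pvLinked_relevel C S v n (a + u.length) c hL' hc
    have hlast := pvLinked_last C S v n c hl2
    have := pvLev_step C S (c + v.length) _ n hlast hsucc
    have harith : c + v.length + 1 = c + (v.length + 1) := by omega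
    rwa [harith] at this
  have pump : ∀ t : Nat, n ∈ pvLev C S (a + u.length + t * (v.length + 1)) := by
    intro t
    induction t with
    | zero => simpa using hL'.1
    | succ k ihk =>
      have := cyc _ ihk
      have harith : a + u.length + k * (v.length + 1) + (v.length + 1)
          = a + u.length + (k + 1) * (v.length + 1) := by ring
      rwa [harith] at this
  have hbig := pump (C.length + 1)
  have hge : C.length + 1 ≤ a + u.length + (C.length + 1) * (v.length + 1) := by
    have : C.length + 1 ≤ (C.length + 1) * (v.length + 1) := Nat.le_mul_of_pos_right _ (by omega)
    omega
  rw [hD _ hge] at hbig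
  exact absurd hbig (List.not_mem_nil)

-- stack-irrelevance of A's DFS along valid paths
lemma pv_stack_irrelevant (C : List (String × List String)) (S B0 : List String)
    (hG : pvHglob C S B0) (hD : pvHdead C S) :
    ∀ (N : Nat) (l p q : List String) (a b : Nat),
      pvMu C (B0 ++ p) + pvMu C (B0 ++ q) = N →
      pvLinked C S a p → pvLinked C S b q → pvNextOk C S a p l → pvNextOk C S b q l →
      expandDfs C l (B0 ++ p) = expandDfs C l (B0 ++ q) := by
  intro N
  induction N using Nat.strong_induction_on with
  | _ N IHN =>
    intro l
    induction l with
    | nil => intro p q a b hN hLp hLq hNp hNq; rw [expandDfs_nil, expandDfs_nil]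
    | cons item rest IHl =>
      intro p q a b hN hLp hLq hNp hNq
      have hNp' : pvNextOk C S a p rest := fun m hm => hNp m (pvRefs_cons_of_mem item rest m hm)
      have hNq' : pvNextOk C S b q rest := fun m hm => hNq m (pvRefs_cons_of_mem item rest m hm)
      by_cases hs : PySem.Str.startswith item "$" = true
      · have hnref : PySem.Str.slice item (some 1) none ∈ pvRefs (item :: rest) :=
          pvRefs_head_mem item rest hs
        obtain ⟨c, hc⟩ := pv_level_of_next C S p (item :: rest) a _ hLp hNp hnref
        obtain ⟨hsome, hcont⟩ := hG c _ hc
        obtain ⟨sub, hget⟩ := Option.isSome_iff_exists.mp hsome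
        have hnp := pv_no_revisit C S hD p (item :: rest) a _ hLp hNp hnref
        have hnq := pv_no_revisit C S hD q (item :: rest) b _ hLq hNq hnref
        have hcp : (B0 ++ p).contains (PySem.Str.slice item (some 1) none) = false := by
          simp only [List.contains_append, Bool.or_eq_false_iff]
          exact ⟨hcont, by simpa using hnp⟩
        have hcq : (B0 ++ q).contains (PySem.Str.slice item (some 1) none) = false := by
          simp only [List.contains_append, Bool.or_eq_false_iff]
          exact ⟨hcont, by simpa using hnq⟩
        have hsuccs : pvSuccs C (PySem.Str.slice item (some 1) none) = pvRefs sub := by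
          simp [pvSuccs, hget]
        have hLp' := pvLinked_snoc C S p (item :: rest) a _ hLp hNp hnref
        have hLq' := pvLinked_snoc C S q (item :: rest) b _ hLq hNq hnref
        have hNp2 : pvNextOk C S a (p ++ [PySem.Str.slice item (some 1) none]) sub := by
          intro m hm
          have hlast : (p ++ [PySem.Str.slice item (some 1) none]).getLast?
              = some (PySem.Str.slice item (some 1) none) := by simp
          rw [hlast]
          show m ∈ pvSuccs C (PySem.Str.slice item (some 1) none)
          rw [hsuccs]; exact hm
        have hNq2 : pvNextOk C S b (q ++ [PySem.Str.slice item (some 1) none]) sub := by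
          intro m hm
          have hlast : (q ++ [PySem.Str.slice item (some 1) none]).getLast?
              = some (PySem.Str.slice item (some 1) none) := by simp
          rw [hlast]
          show m ∈ pvSuccs C (PySem.Str.slice item (some 1) none)
          rw [hsuccs]; exact hm
        have hmup : pvMu C (B0 ++ (p ++ [PySem.Str.slice item (some 1) none])) < pvMu C (B0 ++ p) := by
          rw [← List.append_assoc]
          exact pvMu_lt C (B0 ++ p) _ sub hget hcp
        have hmuq : pvMu C (B0 ++ (q ++ [PySem.Str.slice item (some 1) none])) < pvMu C (B0 ++ q) := by
          rw [← List.append_assoc]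
          exact pvMu_lt C (B0 ++ q) _ sub hget hcq
        have hrec1 := IHN (pvMu C (B0 ++ (p ++ [PySem.Str.slice item (some 1) none]))
              + pvMu C (B0 ++ (q ++ [PySem.Str.slice item (some 1) none]))) (by omega)
            sub (p ++ [PySem.Str.slice item (some 1) none]) (q ++ [PySem.Str.slice item (some 1) none])
            a b rfl hLp' hLq' hNp2 hNq2
        have hrec2 := IHl p q a b hN hLp hLq hNp' hNq'
        rw [expandDfs_cons_ref C item rest (B0 ++ p) hs hcp sub hget,
          expandDfs_cons_ref C item rest (B0 ++ q) hs hcq sub hget,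
          List.append_assoc B0 p, List.append_assoc B0 q, hrec1, hrec2]
      · rw [expandDfs_cons_lit C item rest (B0 ++ p) (by simpa using hs),
          expandDfs_cons_lit C item rest (B0 ++ q) (by simpa using hs),
          IHl p q a b hN hLp hLq hNp' hNq']

-- A's DFS distributes over ++ when the top-level references of the left part pass the checks
lemma pv_dfs_append (C : List (String × List String)) (B0 : List String) :
    ∀ (u w : List String),
      (∀ m ∈ pvRefs u, (PySem.Dict.get? (PySem.Dict.mk C) m).isSome = true ∧ B0.contains m = false) →
      expandDfs C (u ++ w) B0 = expandDfs C u B0 ++ expandDfs C w B0 := by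
  intro u
  induction u with
  | nil => intro w _; simp [expandDfs]
  | cons item u' ih =>
    intro w hchk
    have hchk' : ∀ m ∈ pvRefs u', (PySem.Dict.get? (PySem.Dict.mk C) m).isSome = true ∧ B0.contains m = false :=
      fun m hm => hchk m (pvRefs_cons_of_mem item u' m hm)
    by_cases hs : PySem.Str.startswith item "$" = true
    · obtain ⟨hsome, hcont⟩ := hchk _ (pvRefs_head_mem item u' hs)
      obtain ⟨sub, hget⟩ := Option.isSome_iff_exists.mp hsome
      rw [List.cons_append, expandDfs_cons_ref C item (u' ++ w) B0 hs hcont sub hget,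
        expandDfs_cons_ref C item u' B0 hs hcont sub hget, ih w hchk', List.append_assoc]
    · rw [List.cons_append, expandDfs_cons_lit C item (u' ++ w) B0 (by simpa using hs),
        expandDfs_cons_lit C item u' B0 (by simpa using hs), ih w hchk']
      rfl

lemma pv_dfs_literal (C : List (String × List String)) (s : List String) :
    ∀ (cur : List String), cur.any (fun item => PySem.Str.startswith item "$") = false →
      expandDfs C cur s = cur := by
  intro cur
  induction cur with
  | nil => intro _; simp [expandDfs]
  | cons item rest ih =>
    intro h
    simp only [List.any_cons, Bool.or_eq_false_iff] at h
    rw [expandDfs_cons_lit C item rest s h.1, ih h.2]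

-- one substitution round succeeds, moves the references one level up, and preserves the DFS value
lemma pv_substOnce (C : List (String × List String)) (S B0 : List String)
    (hG : pvHglob C S B0) (hD : pvHdead C S) (j : Nat) :
    ∀ (cur : List String), (∀ m ∈ pvRefs cur, m ∈ pvLev C S j) →
      ∃ nxt, substOnce C B0 cur = some nxt ∧ (∀ m ∈ pvRefs nxt, m ∈ pvLev C S (j + 1)) ∧
        expandDfs C cur B0 = expandDfs C nxt B0 := by
  intro cur
  induction cur with
  | nil => exact fun _ => ⟨[], rfl, by simp [pvRefs], rfl⟩
  | cons item rest ih =>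
    intro hj
    have hj' : ∀ m ∈ pvRefs rest, m ∈ pvLev C S j :=
      fun m hm => hj m (pvRefs_cons_of_mem item rest m hm)
    obtain ⟨nxt', hsub', hlev', hval'⟩ := ih hj'
    by_cases hs : PySem.Str.startswith item "$" = true
    · have hn : PySem.Str.slice item (some 1) none ∈ pvLev C S j :=
        hj _ (pvRefs_head_mem item rest hs)
      obtain ⟨hsome, hcont⟩ := hG j _ hn
      obtain ⟨sub, hget⟩ := Option.isSome_iff_exists.mp hsome
      have hsuccs : pvSuccs C (PySem.Str.slice item (some 1) none) = pvRefs sub := by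
        simp [pvSuccs, hget]
      have hsubmem : ∀ m ∈ pvRefs sub, m ∈ pvLev C S (j + 1) := by
        intro m hm
        exact pvLev_step C S j _ m hn (hsuccs ▸ hm)
      have hs' : PySem.Chars.startswith item.toList ['$'] = true := by simpa using hs
      have hcont' : PySem.Str.slice item (some 1) none ∉ B0 := by simpa using hcont
      refine ⟨sub ++ nxt', ?_, ?_, ?_⟩
      · simp [substOnce, hs', hcont', hget, hsub']
      · intro m hm
        rw [pvRefs, List.filterMap_append] at hm
        rcases List.mem_append.mp hm with hm | hm
        · exact hsubmem m hm
        · exact hlev' m hm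
      · rw [expandDfs_cons_ref C item rest B0 hs hcont sub hget]
        have hIRR : expandDfs C sub (B0 ++ [PySem.Str.slice item (some 1) none]) = expandDfs C sub B0 := by
          have := pv_stack_irrelevant C S B0 hG hD
            (pvMu C (B0 ++ [PySem.Str.slice item (some 1) none]) + pvMu C (B0 ++ []))
            sub [PySem.Str.slice item (some 1) none] [] j (j + 1) rfl
            ⟨hn, trivial, fun m hm => by simp at hm⟩ trivial
            (fun m hm => by simpa [pvNextOk, hsuccs] using hm)
            (fun m hm => by simpa [pvNextOk] using hsubmem m hm)
          simpa using this
        have happ : expandDfs C (sub ++ nxt') B0 = expandDfs C sub B0 ++ expandDfs C nxt' B0 :=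
          pv_dfs_append C B0 sub nxt' (fun m hm => hG (j + 1) m (hsubmem m hm))
        rw [hIRR, hval', happ]
    · have hnone := pvRefOf_not_startswith item hs
      have hs' : PySem.Chars.startswith item.toList ['$'] = false := by
        simpa using hs
      refine ⟨item :: nxt', by simp [substOnce, hs', hsub'], ?_, ?_⟩
      · intro m hm
        rw [pvRefs, List.filterMap_cons, hnone] at hm
        exact hlev' m hm
      · rw [expandDfs_cons_lit C item rest B0 (by simpa using hs),
          expandDfs_cons_lit C item nxt' B0 (by simpa using hs), hval']

lemma pv_loop (C : List (String × List String)) (S B0 : List String)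
    (hG : pvHglob C S B0) (hD : pvHdead C S) :
    ∀ (fuel j : Nat) (cur : List String), 1 ≤ fuel → j + fuel = C.length + 2 →
      (∀ m ∈ pvRefs cur, m ∈ pvLev C S j) →
      substLoop C B0 fuel cur = expandDfs C cur B0 := by
  intro fuel
  induction fuel with
  | zero => intro j cur h1; omega
  | succ k ih =>
    intro j cur _ hsum hrefs
    by_cases hany : cur.any (fun item => PySem.Str.startswith item "$") = true
    · obtain ⟨item, hitem, hsitem⟩ := List.any_eq_true.mp hany
      have hn : PySem.Str.slice item (some 1) none ∈ pvRefs cur :=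
        List.mem_filterMap.mpr ⟨item, hitem, pvRefOf_startswith item hsitem⟩
      have hjK : j ≤ C.length := by
        by_contra hcon
        have hmem := hrefs _ hn
        rw [hD j (by omega)] at hmem
        simp at hmem
      have hk : 1 ≤ k := by omega
      obtain ⟨nxt, hsub, hlev, hval⟩ := pv_substOnce C S B0 hG hD j cur hrefs
      simp only [substLoop, hany, if_true, hsub]
      rw [ih (j + 1) nxt hk (by omega) hlev, hval]
    · simp only [substLoop, Bool.not_eq_true] at hany ⊢
      rw [hany, if_neg (by simp)]
      exact (pv_dfs_literal C B0 cur hany).symm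

-- ===== VERDICT (by name: the statement is the Claim_ definition above) =====
theorem expand_spec_sequence_py_spec : Claim_equal_expand_spec_sequence_py := by
  intro spec C _stack _hDom hPre
  obtain ⟨hG, hD⟩ := pre_imp spec C _stack hPre
  unfold Spec_expand_spec_sequence_py expand_spec_sequence_py expand_spec_sequence_py_alt
  exact (pv_loop C (pvRefs spec) (pvBase _stack) hG hD (C.length + 2) 0 spec (by omega) (by omega)
    (fun m hm => hm)).symm
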